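-- pv_equiv track=rewrite | github.com/Jupiter-Jzhou/GlidedSky | anti_ip_block/proxy_pool.py | gen_pages_kdl
-- ===== SOURCE A (Python) =====
-- def gen_pages_kdl(page_need):
--     """制作每页的url 和 referer"""
--     url_kdl = "https://www.kuaidaili.com"
--     for page in page_need:
--         if page == 1:
--             url_page = url_kdl + "/free/"
--             referer = url_kdl
--         elif page == 2:
--             url_page = url_kdl + f"/free/inha/{page}/"
--             referer = url_kdl + "/free/"
--         else:
--             url_page = url_kdl + f"/free/inha/{page}/"
--             referer = url_kdl + f"/free/inha/{page - 1}/"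
--
--         yield url_page, referer
-- ===== SOURCE B (Python) =====
-- def gen_pages_kdl(page_need):
--     """制作每页的url 和 referer"""
--     base = "https://www.kuaidaili.com"
--     pages = list(page_need)
--     # column 1: the url of each requested page
--     urls = [base + "/free/" if p == 1 else base + f"/free/inha/{p}/" for p in pages]
--     # column 2: referers, computed from the decremented page sequence
--     # (page 0 stands for the bare site root)
--     refs = [base if q == 0 else base + "/free/" if q == 1 else base + f"/free/inha/{q}/"
--             for q in (p - 1 for p in pages)]
--     yield from zip(urls, refs)
-- ===== Notes on version B (the rewrite author's own statement) =====
-- stated objective: alternative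
-- what changed: Instead of one loop with a coupled three-way branch producing both fields, B computes the url column and the referer column in two separate staged passes - the referers as a mapping over the decremented page sequence with its own base cases - and zips the columns.
import Mathlib
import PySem

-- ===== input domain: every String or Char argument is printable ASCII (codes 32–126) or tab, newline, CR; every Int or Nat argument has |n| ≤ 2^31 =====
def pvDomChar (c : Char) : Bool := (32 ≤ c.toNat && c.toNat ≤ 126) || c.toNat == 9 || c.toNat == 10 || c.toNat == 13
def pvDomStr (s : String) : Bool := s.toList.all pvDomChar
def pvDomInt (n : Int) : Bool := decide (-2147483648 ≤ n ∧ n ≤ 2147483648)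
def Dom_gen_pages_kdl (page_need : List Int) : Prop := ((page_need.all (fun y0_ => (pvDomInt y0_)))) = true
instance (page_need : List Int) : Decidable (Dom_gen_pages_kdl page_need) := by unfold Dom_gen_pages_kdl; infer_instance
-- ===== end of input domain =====

-- B builds the url column and the referer column in two staged passes (the referers from
-- the decremented page sequence) and zips them, instead of A's single coupled branch loop.
-- ===== PORT A =====
def gen_pages_kdl (page_need : List Int) : List (String × String) :=
  let url_kdl := "https://www.kuaidaili.com"
  page_need.map (fun page =>
    if page == 1 then
      (url_kdl ++ "/free/", url_kdl)
    else if page == 2 then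
      (url_kdl ++ "/free/inha/" ++ PySem.Int.toStr page ++ "/", url_kdl ++ "/free/")
    else
      (url_kdl ++ "/free/inha/" ++ PySem.Int.toStr page ++ "/",
       url_kdl ++ "/free/inha/" ++ PySem.Int.toStr (page - 1) ++ "/"))

-- ===== PORT B =====
def gen_pages_kdl_alt (page_need : List Int) : List (String × String) :=
  let base := "https://www.kuaidaili.com"
  let urls := page_need.map (fun p =>
    if p == 1 then base ++ "/free/" else base ++ "/free/inha/" ++ PySem.Int.toStr p ++ "/")
  let refs := (page_need.map (fun p => p - 1)).map (fun q =>
    if q == 0 then base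
    else if q == 1 then base ++ "/free/"
    else base ++ "/free/inha/" ++ PySem.Int.toStr q ++ "/")
  urls.zip refs

-- ===== PRECONDITION & SPEC =====
def Spec_gen_pages_kdl (page_need : List Int) (out : List (String × String)) : Prop := out = gen_pages_kdl_alt page_need
instance (page_need : List Int) (out : List (String × String)) : Decidable (Spec_gen_pages_kdl page_need out) := by unfold Spec_gen_pages_kdl; infer_instance

-- ===== CLAIM (what is proved, stated in full; the proofs are below) =====
def Claim_equal_gen_pages_kdl : Prop := ∀ (page_need : List Int), Dom_gen_pages_kdl page_need → Spec_gen_pages_kdl page_need (gen_pages_kdl page_need)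

-- ===== LEMMAS AND PROOFS =====

-- A's per-page pair equals (url column entry, referer of the decremented page).
lemma pv_pointwise (page : Int) :
    (if page == 1 then
      ("https://www.kuaidaili.com" ++ "/free/", "https://www.kuaidaili.com")
    else if page == 2 then
      ("https://www.kuaidaili.com" ++ "/free/inha/" ++ PySem.Int.toStr page ++ "/",
       "https://www.kuaidaili.com" ++ "/free/")
    else
      ("https://www.kuaidaili.com" ++ "/free/inha/" ++ PySem.Int.toStr page ++ "/",
       "https://www.kuaidaili.com" ++ "/free/inha/" ++ PySem.Int.toStr (page - 1) ++ "/"))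
    = ((if page == 1 then "https://www.kuaidaili.com" ++ "/free/"
        else "https://www.kuaidaili.com" ++ "/free/inha/" ++ PySem.Int.toStr page ++ "/"),
       (if page - 1 == 0 then "https://www.kuaidaili.com"
        else if page - 1 == 1 then "https://www.kuaidaili.com" ++ "/free/"
        else "https://www.kuaidaili.com" ++ "/free/inha/" ++ PySem.Int.toStr (page - 1) ++ "/")) := by
  by_cases h1 : page = 1
  · simp [h1]
  · by_cases h2 : page = 2
    · simp [h2]
    · simp [h1, h2, show ¬ (page - 1 = 0) by omega, show ¬ (page - 1 = 1) by omega]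

-- ===== VERDICT (by name: the statement is the Claim_ definition above) =====
theorem gen_pages_kdl_spec : Claim_equal_gen_pages_kdl := by
  intro page_need _
  unfold Spec_gen_pages_kdl gen_pages_kdl gen_pages_kdl_alt
  simp only [List.map_map, List.zip_map']
  exact List.map_congr_left (fun p _ => pv_pointwise p)
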